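-- pv_equiv track=rewrite | github.com/kum0621/kum0621 | algorism/211012/4012_요리사/s1.py | item_div
-- ===== SOURCE A (Python) =====
-- from itertools import combinations
--
-- def item_div(N): # 식재료 나누는 경우의 수 구하기
--     item = [i for i in range(N)]
--     combinate = list(combinations(item, N//2)) # 식재료 조합
--     result = []
--     for i in range(len(combinate)):
--         arr = [0] * N
--         for j in range(N//2):
--             arr[combinate[i][j]] = 1
--         result.append(arr)
--     return result
-- ===== SOURCE B (Python) =====
-- def item_div(N): # 식재료 나누는 경우의 수 구하기
--     k = N // 2
--     def rec(mask, pos, ones):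
--         if pos == N:
--             return [mask[:]] if ones == k else []
--         out = []
--         if ones < k:
--             mask[pos] = 1
--             out += rec(mask, pos + 1, ones + 1)
--             mask[pos] = 0
--         out += rec(mask, pos + 1, ones)
--         return out
--     return rec([0] * N, 0, 0)
-- ===== Notes on version B (the rewrite author's own statement) =====
-- stated objective: alternative
-- what changed: Replaces itertools.combinations followed by a second pass that scatters each index tuple into a zero array with a single backtracking recursion over positions that builds each 0/1 mask in place, choosing indices in increasing order so the emitted order matches combinations.
import Mathlib
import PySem

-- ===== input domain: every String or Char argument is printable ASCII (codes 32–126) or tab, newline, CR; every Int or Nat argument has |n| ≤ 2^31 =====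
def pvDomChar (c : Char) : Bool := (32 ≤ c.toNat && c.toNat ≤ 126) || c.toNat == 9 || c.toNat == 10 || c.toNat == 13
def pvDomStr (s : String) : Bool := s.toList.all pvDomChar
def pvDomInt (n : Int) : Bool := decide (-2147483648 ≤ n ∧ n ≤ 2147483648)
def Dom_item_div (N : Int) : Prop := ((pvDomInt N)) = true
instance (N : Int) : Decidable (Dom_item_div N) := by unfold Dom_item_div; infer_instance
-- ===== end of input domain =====

-- B replaces the combinations-then-scatter two-pass construction with a single backtracking
-- recursion over positions that builds each 0/1 mask directly (alternative decomposition, same cost).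


-- ===== PORT A =====
-- itertools.combinations on a list, in itertools' lexicographic emission order
def combsA (l : List Int) (k : Nat) : List (List Int) :=
  match k, l with
  | 0, _ => [[]]
  | _+1, [] => []
  | k'+1, x :: xs => ((combsA xs k').map (fun c => x :: c)) ++ combsA xs (k'+1)

def item_div (N : Int) : List (List Int) :=
  let item := PySem.List.pyRange 0 N 1
  let combinate := combsA item (PySem.Int.floordiv N 2).toNat
  combinate.foldl
    (fun result c =>
      result ++ [c.foldl (fun arr j => arr.set j.toNat 1) (List.replicate N.toNat 0)]) []

-- ===== PORT B =====
-- Source B's rec(mask, pos, ones); the Python tests pos == N, here rem = N - pos is the fuel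
def goB (k : Nat) : Nat → List Int → Nat → Nat → List (List Int)
  | 0, mask, _, ones => if ones = k then [mask] else []
  | rem+1, mask, pos, ones =>
      (if ones < k then goB k rem (mask.set pos 1) (pos+1) (ones+1) else []) ++
      goB k rem mask (pos+1) ones

def item_div_alt (N : Int) : List (List Int) :=
  let k := (PySem.Int.floordiv N 2).toNat
  goB k N.toNat (List.replicate N.toNat 0) 0 0

-- ===== PRECONDITION & SPEC =====
-- Pre_ excludes N < 0, where A raises ValueError (combinations with negative r).
def Pre_item_div (N : Int) : Prop := 0 ≤ N
instance (N : Int) : Decidable (Pre_item_div N) := by unfold Pre_item_div; infer_instance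
def pvWitness_item_div : Int := (4)

def Spec_item_div (N : Int) (out : List (List Int)) : Prop := out = item_div_alt N
instance (N : Int) (out : List (List Int)) : Decidable (Spec_item_div N out) := by unfold Spec_item_div; infer_instance

-- ===== CLAIM (what is proved, stated in full; the proofs are below) =====
def Claim_equal_item_div : Prop := ∀ (N : Int), Dom_item_div N → Pre_item_div N → Spec_item_div N (item_div N)

-- ===== LEMMAS AND PROOFS =====
-- the position list [s, s+1, ..., s+r-1]
def intsF : Int → Nat → List Int
  | _, 0 => []
  | s, r+1 => s :: intsF (s+1) r

theorem pyRange_eq_intsF : ∀ (r : Nat) (s : Int), PySem.List.pyRange s (s + r) 1 = intsF s r := by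
  intro r
  induction r with
  | zero => intro s; simp [intsF, PySem.List.pyRange_one_eq_nil]
  | succ n ih =>
      intro s
      rw [PySem.List.pyRange_one_cons (by omega), intsF]
      have : s + (↑(n+1) : Int) = (s+1) + ↑n := by push_cast; ring
      rw [this, ih (s+1)]

theorem foldl_app (g : List Int → List Int) :
    ∀ (l : List (List Int)) (acc : List (List Int)),
      l.foldl (fun r c => r ++ [g c]) acc = acc ++ l.map g := by
  intro l
  induction l with
  | nil => simp
  | cons x xs ih => intro acc; simp [List.foldl, ih]

theorem goB_eq (k : Nat) : ∀ (rem pos ones : Nat) (mask : List Int),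
    mask.length = pos + rem → ones ≤ k →
    goB k rem mask pos ones
      = (combsA (intsF (pos : Int) rem) (k - ones)).map
          (fun c => c.foldl (fun arr j => arr.set j.toNat 1) mask) := by
  intro rem
  induction rem with
  | zero =>
      intro pos ones mask hlen hle
      by_cases h : ones = k
      · subst h; simp [goB, intsF, combsA]
      · have h0 : k - ones ≠ 0 := by omega
        obtain ⟨m, hm⟩ := Nat.exists_eq_succ_of_ne_zero h0
        simp [goB, intsF, hm, combsA, h]
  | succ n ih =>
      intro pos ones mask hlen hle
      rw [goB, intsF]
      by_cases h : ones < k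
      · have hm : k - ones = (k - (ones+1)) + 1 := by omega
        rw [if_pos h, hm, combsA]
        have hc : (((pos+1 : Nat)) : Int) = (pos : Int) + 1 := by push_cast; ring
        rw [ih (pos+1) (ones+1) (mask.set pos 1) (by simp; omega) (by omega),
            ih (pos+1) ones mask (by omega) hle, hc, ← hm]
        simp only [List.map_append, List.map_map]
        congr 1
      · have hek : ones = k := by omega
        have hm : k - ones = 0 := by omega
        rw [if_neg h, hm, combsA]
        rw [ih (pos+1) ones mask (by omega) hle, hm]
        have : ((pos+1 : Nat) : Int) = (pos : Int) + 1 := by push_cast; ring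
        rw [this]
        simp [combsA]

theorem item_div_eq_map (N : Int) (h : 0 ≤ N) :
    item_div N = (combsA (intsF 0 N.toNat) (PySem.Int.floordiv N 2).toNat).map
      (fun c => c.foldl (fun arr j => arr.set j.toNat 1) (List.replicate N.toNat 0)) := by
  unfold item_div
  have hr : PySem.List.pyRange 0 N 1 = intsF 0 N.toNat := by
    have := pyRange_eq_intsF N.toNat 0
    rwa [show (0 : Int) + (N.toNat : Int) = N by omega] at this
  rw [hr, foldl_app]
  simp

-- ===== VERDICT (by name: the statement is the Claim_ definition above) =====
theorem item_div_spec : Claim_equal_item_div := by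
  intro N _ hPre
  unfold Spec_item_div
  rw [item_div_eq_map N hPre]
  unfold item_div_alt
  rw [goB_eq _ N.toNat 0 0 (List.replicate N.toNat 0) (by simp) (by omega)]
  simp
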